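-- pv_equiv track=rewrite | github.com/valerpok/Make_mosaic | mosaicer.py | find_mean_RGB
-- ===== SOURCE A (Python) =====
-- def find_mean_RGB(pixels):
--
--     reds = []
--     greens = []
--     blues = []
--
--     for (r, g, b) in pixels:
--         reds.append(r)
--         greens.append(g)
--         blues.append(b)
--
--     r, g, b = map(lambda x: sum(x)//len(x), (reds, greens, blues))
--
--     return r, g, b
-- ===== SOURCE B (Python) =====
-- def find_mean_RGB(pixels):
--     sum_r = sum_g = sum_b = n = 0
--     for (r, g, b) in pixels:
--         sum_r += r
--         sum_g += g
--         sum_b += b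
--         n += 1
--     return sum_r // n, sum_g // n, sum_b // n
-- ===== Notes on version B (the rewrite author's own statement) =====
-- stated objective: simpler
-- what changed: One accumulating pass with three integer sums and a counter replaces building three intermediate lists and reducing each; no intermediate lists are allocated.
import Mathlib
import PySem

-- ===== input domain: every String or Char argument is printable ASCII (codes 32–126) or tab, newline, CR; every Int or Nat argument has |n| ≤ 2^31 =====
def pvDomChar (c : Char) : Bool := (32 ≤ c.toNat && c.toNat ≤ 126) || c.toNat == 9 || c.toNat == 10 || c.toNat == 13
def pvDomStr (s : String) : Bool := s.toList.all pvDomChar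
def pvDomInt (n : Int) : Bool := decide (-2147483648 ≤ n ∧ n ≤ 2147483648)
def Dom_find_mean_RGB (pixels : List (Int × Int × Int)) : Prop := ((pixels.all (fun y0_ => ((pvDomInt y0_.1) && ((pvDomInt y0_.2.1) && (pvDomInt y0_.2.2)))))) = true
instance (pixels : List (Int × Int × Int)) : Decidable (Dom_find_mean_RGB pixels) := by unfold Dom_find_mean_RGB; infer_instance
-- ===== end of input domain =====

-- B replaces A's build-three-lists-then-reduce with a single accumulating pass
-- (three running sums and a counter); simpler, O(1) extra space.

-- ===== PORT A =====
-- A: append each channel to its own list, then map sum(x)//len(x) over the three lists.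
def find_mean_RGB (pixels : List (Int × Int × Int)) : Int × Int × Int :=
  let s := pixels.foldl
    (fun (s : List Int × List Int × List Int) p =>
      (s.1 ++ [p.1], s.2.1 ++ [p.2.1], s.2.2 ++ [p.2.2]))
    ([], [], [])
  (PySem.Int.floordiv s.1.sum (PySem.List.len s.1),
   PySem.Int.floordiv s.2.1.sum (PySem.List.len s.2.1),
   PySem.Int.floordiv s.2.2.sum (PySem.List.len s.2.2))

-- ===== PORT B =====
-- B: one pass maintaining (sum_r, sum_g, sum_b, n), then the three floor divisions.
def find_mean_RGB_alt (pixels : List (Int × Int × Int)) : Int × Int × Int :=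
  let a := pixels.foldl
    (fun (a : Int × Int × Int × Int) p =>
      (a.1 + p.1, a.2.1 + p.2.1, a.2.2.1 + p.2.2, a.2.2.2 + 1))
    (0, 0, 0, 0)
  (PySem.Int.floordiv a.1 a.2.2.2,
   PySem.Int.floordiv a.2.1 a.2.2.2,
   PySem.Int.floordiv a.2.2.1 a.2.2.2)

-- ===== PRECONDITION & SPEC =====
-- Pre_ excludes only the empty list, on which both A and B raise ZeroDivisionError.
def Pre_find_mean_RGB (pixels : List (Int × Int × Int)) : Prop := pixels ≠ []
instance (pixels : List (Int × Int × Int)) : Decidable (Pre_find_mean_RGB pixels) := by unfold Pre_find_mean_RGB; infer_instance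
def pvWitness_find_mean_RGB : (List (Int × Int × Int)) := [(1, 2, 3), (4, 5, 7)]

def Spec_find_mean_RGB (pixels : List (Int × Int × Int)) (out : Int × Int × Int) : Prop := out = find_mean_RGB_alt pixels
instance (pixels : List (Int × Int × Int)) (out : Int × Int × Int) : Decidable (Spec_find_mean_RGB pixels out) := by unfold Spec_find_mean_RGB; infer_instance

-- ===== CLAIM (what is proved, stated in full; the proofs are below) =====
def Claim_equal_find_mean_RGB : Prop := ∀ (pixels : List (Int × Int × Int)), Dom_find_mean_RGB pixels → Pre_find_mean_RGB pixels → Spec_find_mean_RGB pixels (find_mean_RGB pixels)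

-- ===== LEMMAS AND PROOFS =====

-- A's fold builds the three channel lists (with accumulators generalized).
theorem foldA_eq (pixels : List (Int × Int × Int)) (r0 g0 b0 : List Int) :
    pixels.foldl
      (fun (s : List Int × List Int × List Int) p =>
        (s.1 ++ [p.1], s.2.1 ++ [p.2.1], s.2.2 ++ [p.2.2]))
      (r0, g0, b0)
    = (r0 ++ pixels.map (·.1), g0 ++ pixels.map (·.2.1), b0 ++ pixels.map (·.2.2)) := by
  induction pixels generalizing r0 g0 b0 with
  | nil => simp
  | cons p ps ih => simp [List.foldl, ih]

-- B's fold computes the three channel sums and the length (accumulators generalized).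
theorem foldB_eq (pixels : List (Int × Int × Int)) (a b c n : Int) :
    pixels.foldl
      (fun (a : Int × Int × Int × Int) p =>
        (a.1 + p.1, a.2.1 + p.2.1, a.2.2.1 + p.2.2, a.2.2.2 + 1))
      (a, b, c, n)
    = (a + (pixels.map (·.1)).sum, b + (pixels.map (·.2.1)).sum,
       c + (pixels.map (·.2.2)).sum, n + pixels.length) := by
  induction pixels generalizing a b c n with
  | nil => simp
  | cons p ps ih => simp [List.foldl, ih]; omega

-- ===== VERDICT (by name: the statement is the Claim_ definition above) =====
theorem find_mean_RGB_spec : Claim_equal_find_mean_RGB := by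
  intro pixels _ _
  unfold Spec_find_mean_RGB find_mean_RGB find_mean_RGB_alt
  rw [foldA_eq, foldB_eq]
  simp [PySem.List.len_eq]
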